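-- pv_equiv track=rewrite | github.com/sjf/project_euler | lib.py | permutations_lexico
-- ===== SOURCE A (Python) =====
-- def permutations_lexico(l):
--   """ Generator for the permutations of l using swapping, in lexicographic order using the
--       Narayana Pandita algorithm.. The results will be unique even if there are
--       duplicate elements in l."""
--   if not l:
--     return # no results
--
--   l = l[:]
--   l.sort()
--   yield l
--
--   ln = len(l)
--   more_results = True
--   while more_results:
--     # Find largest i, such that l[i] < l[i+1]
--     i = ln-2
--     while i >= 0:
--       if l[i] < l[i+1]:
--         break
--       else:
--         i -= 1
--
--     if i >= 0:
--       # Find the largest index such that l[i] < l[j]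
--       j = ln-1
--       while j > i:
--         if l[i] < l[j]:
--           break
--         else:
--           j -= 1
--       # Swap l[i],l[j]
--       l[i],l[j] = l[j],l[i]
--       # Reverse list from l[i+1]
--       reversel(l, i+1)
--
--       yield l[:]
--     else: # No value for i
--       more_results = False
--
-- def reversel(l,a=0,b=None):
--   """ Reverse a list in place from index a up to b, which default to the start and the end. """
--   if b is None:
--     b = len(l)
--   assert a <= b <= len(l)
--
--   num_swaps = (b-a)//2
--   for i in range(num_swaps):
--     j = b-i-1
--     l[a+i],l[j] = l[j],l[a+i]
--   return l
-- ===== SOURCE B (Python) =====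
-- def permutations_lexico(l):
--   """ Generator for the distinct permutations of l in lexicographic order.
--       One working list is stepped in place from each permutation to the
--       next: find where the non-increasing tail starts, replace the element
--       just before it by its successor from the tail, and re-sort the tail. """
--   if not l:
--     return
--
--   cur = sorted(l)
--   yield cur
--
--   while True:
--     # k = start of the longest non-increasing tail of cur
--     k = len(cur) - 1
--     while k > 0 and cur[k-1] >= cur[k]:
--       k -= 1
--     if k == 0:
--       return
--
--     tail = cur[k:]
--     succ = min(v for v in tail if v > cur[k-1])
--     tail.remove(succ)
--     tail.append(cur[k-1])
--     tail.sort()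
--     cur[k-1] = succ
--     cur[k:] = tail
--     yield cur[:]
-- ===== Notes on version B (the rewrite author's own statement) =====
-- stated objective: alternative
-- what changed: The next-permutation step is restructured: instead of A's scan for the rightmost j with l[i]<l[j], swap, and in-place suffix reversal, B finds the start of the non-increasing tail, picks the pivot's successor with min over the tail, and rebuilds the tail by removing the successor, appending the pivot and sorting; both keep one working buffer that the generator yields first and then steps in place.
import Mathlib
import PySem

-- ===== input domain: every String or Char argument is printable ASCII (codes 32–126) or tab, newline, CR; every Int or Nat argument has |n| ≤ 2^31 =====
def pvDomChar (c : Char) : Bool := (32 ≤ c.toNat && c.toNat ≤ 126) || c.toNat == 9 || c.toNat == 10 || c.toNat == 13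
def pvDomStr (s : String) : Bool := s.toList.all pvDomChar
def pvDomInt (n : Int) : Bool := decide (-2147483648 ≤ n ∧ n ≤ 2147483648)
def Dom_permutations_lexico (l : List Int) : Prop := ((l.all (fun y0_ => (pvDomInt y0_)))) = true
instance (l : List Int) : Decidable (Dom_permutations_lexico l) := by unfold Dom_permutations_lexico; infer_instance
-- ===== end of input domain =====

-- B restructures the next-permutation step: instead of A's scan for the rightmost j with
-- l[i] < l[j], swap and in-place suffix reversal, B locates the start of the non-increasing
-- tail, picks the pivot's successor with min over the tail and rebuilds the tail by sorting.
-- Both Pythons are generators over ONE working buffer (yielded first, then stepped in place);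
-- the ports return the materialised list(...), whose first element is that buffer's final state.

-- ===== PORT A =====
-- Inner while loop "find largest i such that l[i] < l[i+1]", scanning i downward from ln-2;
-- pvFindI l (i+1) performs the check at index i; result none is Python's i = -1.  All list
-- reads of A are at in-range nonnegative indices, so List.getD _ _ 0 is exact for l[i].

def pvFindI (l : List Int) : Nat → Option Nat
  | 0 => none
  | (i+1) => if l.getD i 0 < l.getD (i+1) 0 then some i else pvFindI l i

-- "find largest j > i such that l[i] < l[j]", scanning j downward from ln-1 (the inner while)
def pvFindJ (l : List Int) (i : Nat) : Nat → Nat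
  | 0 => 0
  | (j+1) => if i < j+1 then (if l.getD i 0 < l.getD (j+1) 0 then j+1 else pvFindJ l i j) else j+1

-- l[i],l[j] = l[j],l[i]
def pvSwap (l : List Int) (i j : Nat) : List Int := (l.set i (l.getD j 0)).set j (l.getD i 0)

-- reversel: the swap loop "for i in range((b-a)//2): j = b-i-1; swap l[a+i],l[j]" (called with a=i+1, b=len)
def pvReversel (l : List Int) (a b : Nat) : List Int :=
  (List.range ((b - a) / 2)).foldl (fun m i => pvSwap m (a + i) (b - i - 1)) l

-- one iteration of A's while body: the next permutation, or none when no i ≥ 0 is found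
def pvNextPerm (l : List Int) : Option (List Int) :=
  match pvFindI l (l.length - 1) with
  | none => none
  | some i =>
    let j := pvFindJ l i (l.length - 1)
    some (pvReversel (pvSwap l i j) (i + 1) l.length)

-- A's "while more_results" loop; fuel n! bounds the number of next-permutation steps
def pvLoop : Nat → List Int → List (List Int)
  | 0, _ => []
  | (f+1), cur =>
    match pvNextPerm cur with
    | none => []
    | some nxt => nxt :: pvLoop f nxt

-- The generator first yields its working buffer `l` itself and later yields copies (l[:]);
-- once exhausted the buffer holds the LAST permutation, so the materialised result is the
-- yield list with its first element replaced by its last.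
def pvEmitA (Y : List (List Int)) : List (List Int) :=
  match Y.getLast? with
  | none => []
  | some m => m :: Y.tail

def permutations_lexico (l : List Int) : List (List Int) :=
  if l = [] then []
  else
    pvEmitA (PySem.List.sorted l (fun x => x) false ::
      pvLoop (Nat.factorial l.length) (PySem.List.sorted l (fun x => x) false))

-- ===== PORT B =====
-- "k = len(cur)-1; while k > 0 and cur[k-1] >= cur[k]: k -= 1": start of the non-increasing tail
def pvTailStart (cur : List Int) : Nat → Nat
  | 0 => 0
  | (k+1) => if cur.getD (k+1) 0 ≤ cur.getD k 0 then pvTailStart cur k else k+1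

-- one iteration of B's while body: succ = min(v for v in tail if v > cur[k-1]);
-- tail.remove(succ); tail.append(cur[k-1]); tail.sort(); cur[k-1] = succ; cur[k:] = tail
def pvStepB (cur : List Int) : Option (List Int) :=
  let k := pvTailStart cur (cur.length - 1)
  if k = 0 then none
  else
    let piv := cur.getD (k-1) 0
    let tail := cur.drop k
    match PySem.List.min? (tail.filter (fun v => decide (piv < v))) (fun x => x) with
    | none => none      -- unreachable: cur[k] > piv is in the tail, so Python's min has input
    | some succ =>
      match PySem.List.remove? tail succ with
      | none => none    -- unreachable: succ was drawn from tail
      | some t2 =>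
        some (((cur.set (k-1) succ).take k) ++ PySem.List.sorted (t2 ++ [piv]) (fun x => x) false)

-- B's "while True" loop, same fuel bound as A's port
def pvLoopB : Nat → List Int → List (List Int)
  | 0, _ => []
  | (f+1), cur =>
    match pvStepB cur with
    | none => []
    | some nxt => nxt :: pvLoopB f nxt

-- B too yields its working buffer first and copies afterwards; the buffer ends at the last
-- permutation, so the materialised list's first element is its last.
def pvEmitB (Y : List (List Int)) : List (List Int) :=
  match Y with
  | [] => []
  | _ :: t => Y.getLastD [] :: t

def permutations_lexico_alt (l : List Int) : List (List Int) :=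
  if l = [] then []
  else
    pvEmitB (PySem.List.sorted l (fun x => x) false ::
      pvLoopB (Nat.factorial l.length) (PySem.List.sorted l (fun x => x) false))

-- ===== PRECONDITION & SPEC =====
def Spec_permutations_lexico (l : List Int) (out : List (List Int)) : Prop := out = permutations_lexico_alt l
instance (l : List Int) (out : List (List Int)) : Decidable (Spec_permutations_lexico l out) := by unfold Spec_permutations_lexico; infer_instance

-- ===== CLAIM (what is proved, stated in full; the proofs are below) =====
def Claim_equal_permutations_lexico : Prop := ∀ (l : List Int), Dom_permutations_lexico l → Spec_permutations_lexico l (permutations_lexico l)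

-- ===== LEMMAS AND PROOFS =====

-- B's tail-start scan is A's pivot scan, shifted by one
theorem pvTailStart_eq (cur : List Int) (m : Nat) :
    pvTailStart cur m = (match pvFindI cur m with | some i => i+1 | none => 0) := by
  induction m with
  | zero => rfl
  | succ k ih =>
    rw [show pvTailStart cur (k+1) = if cur.getD (k+1) 0 ≤ cur.getD k 0 then pvTailStart cur k else k+1 from rfl]
    rw [show pvFindI cur (k+1) = if cur.getD k 0 < cur.getD (k+1) 0 then some k else pvFindI cur k from rfl]
    by_cases h : cur.getD k 0 < cur.getD (k+1) 0
    · rw [if_neg (by omega), if_pos h]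
    · rw [if_pos (by omega), if_neg h, ih]

-- what A's pivot scan guarantees
theorem pvFindI_spec (cur : List Int) (m i : Nat) (h : pvFindI cur m = some i) :
    i + 1 ≤ m ∧ cur.getD i 0 < cur.getD (i+1) 0 ∧
    ∀ t, i < t → t < m → cur.getD (t+1) 0 ≤ cur.getD t 0 := by
  induction m with
  | zero => simp [pvFindI] at h
  | succ k ih =>
    rw [show pvFindI cur (k+1) = if cur.getD k 0 < cur.getD (k+1) 0 then some k else pvFindI cur k from rfl] at h
    by_cases hk : cur.getD k 0 < cur.getD (k+1) 0
    · rw [if_pos hk] at h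
      obtain rfl : k = i := by simpa using h
      exact ⟨by omega, hk, fun t ht1 ht2 => by omega⟩
    · rw [if_neg hk] at h
      obtain ⟨h1, h2, h3⟩ := ih h
      refine ⟨by omega, h2, ?_⟩
      intro t ht1 ht2
      rcases Nat.lt_or_ge t k with h' | h'
      · exact h3 t ht1 h'
      · have : t = k := by omega
        subst this; omega

theorem pvFindI_cons (x : Int) (r : List Int) (k : Nat) :
    pvFindI (x :: r) (k+1) =
      (match pvFindI r k with
       | some i => some (i+1)
       | none => if x < r.getD 0 0 then some 0 else none) := by
  induction k with
  | zero => simp [pvFindI]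
  | succ m ih =>
    rw [show pvFindI (x::r) (m+1+1) = if (x::r).getD (m+1) 0 < (x::r).getD (m+2) 0 then some (m+1) else pvFindI (x::r) (m+1) from rfl]
    rw [show pvFindI r (m+1) = if r.getD m 0 < r.getD (m+1) 0 then some m else pvFindI r m from rfl]
    simp only [List.getD_cons_succ]
    split <;> simp [ih]

-- what A's j-scan guarantees at pivot 0
theorem pvFindJ_props (l : List Int) (m : Nat) (hm : 1 ≤ m) (h0 : l.getD 0 0 < l.getD 1 0) :
    1 ≤ pvFindJ l 0 m ∧ pvFindJ l 0 m ≤ m ∧ l.getD 0 0 < l.getD (pvFindJ l 0 m) 0 ∧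
    ∀ t, pvFindJ l 0 m < t → t ≤ m → l.getD t 0 ≤ l.getD 0 0 := by
  induction m with
  | zero => omega
  | succ k ih =>
    rw [show pvFindJ l 0 (k+1) = if 0 < k+1 then (if l.getD 0 0 < l.getD (k+1) 0 then k+1 else pvFindJ l 0 k) else k+1 from rfl]
    rw [if_pos (by omega)]
    by_cases hk : l.getD 0 0 < l.getD (k+1) 0
    · rw [if_pos hk]
      exact ⟨by omega, le_refl _, hk, fun t ht1 ht2 => by omega⟩
    · rw [if_neg hk]
      rcases Nat.lt_or_ge k 1 with h1 | h1
      · obtain rfl : k = 0 := by omega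
        exact absurd h0 hk
      · obtain ⟨g1, g2, g3, g4⟩ := ih h1
        refine ⟨g1, by omega, g3, ?_⟩
        intro t ht1 ht2
        rcases Nat.lt_or_ge t (k+1) with h' | h'
        · exact g4 t ht1 (by omega)
        · have : t = k+1 := by omega
          subst this; omega

theorem pvSwap_cons (x : Int) (r : List Int) (p q : Nat) :
    pvSwap (x :: r) (p+1) (q+1) = x :: pvSwap r p q := by
  simp [pvSwap]

theorem pvSwap_zero_succ (x : Int) (t : List Int) (m : Nat) :
    pvSwap (x :: t) 0 (m+1) = t.getD m 0 :: t.set m x := by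
  simp [pvSwap]

theorem pvFoldl_cons (x : Int) (L : List Nat) (g g' : List Int → Nat → List Int)
    (h : ∀ acc i, i ∈ L → g (x :: acc) i = x :: g' acc i) :
    ∀ m : List Int, L.foldl g (x :: m) = x :: L.foldl g' m := by
  induction L with
  | nil => intro m; rfl
  | cons a L ih =>
    intro m
    rw [List.foldl_cons, List.foldl_cons, h _ _ (by simp)]
    exact ih (fun acc i hi => h acc i (by simp [hi])) _

theorem pvReversel_cons (x : Int) (m : List Int) (a b : Nat) :
    pvReversel (x :: m) (a+1) (b+1) = x :: pvReversel m a b := by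
  unfold pvReversel
  have hsub : (b + 1 - (a + 1)) = b - a := by omega
  rw [hsub]
  rcases Nat.eq_zero_or_pos ((b - a)/2) with h0 | hpos
  · simp [h0]
  · apply pvFoldl_cons
    intro acc i hi
    have hib : i < (b-a)/2 := by simpa using hi
    have h1 : a + 1 + i = (a + i) + 1 := by omega
    have h2 : b + 1 - i - 1 = (b - i - 1) + 1 := by omega
    rw [h1, h2, pvSwap_cons]

theorem pvReversel_step (l : List Int) (m : Nat) :
    pvReversel l 0 (m+2) = pvReversel (pvSwap l 0 (m+1)) 1 (m+1) := by
  unfold pvReversel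
  have h2 : (m+2-0)/2 = (m/2)+1 := by omega
  rw [h2, List.range_succ_eq_map, List.foldl_cons, List.foldl_map]
  have h3 : (m+1-1)/2 = m/2 := by omega
  rw [h3]
  have hf : (fun (acc : List Int) (i : Nat) => pvSwap acc (0 + Nat.succ i) (m+2 - Nat.succ i - 1))
      = (fun (acc : List Int) (i : Nat) => pvSwap acc (1 + i) (m+1 - i - 1)) := by
    funext acc i; congr 1 <;> omega
  have hinit : pvSwap l (0 + 0) (m + 2 - 0 - 1) = pvSwap l 0 (m+1) := by norm_num
  rw [hf, hinit]

theorem pvReversel_zero (l : List Int) (b : Nat) (hb : b ≤ l.length) :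
    pvReversel l 0 b = (l.take b).reverse ++ l.drop b := by
  induction b using Nat.strong_induction_on generalizing l with
  | _ b ih =>
    match b, l, hb with
    | 0, l, _ => simp [pvReversel]
    | 1, l, hb =>
      have : (1-0)/2 = 0 := by omega
      cases l with
      | nil => simp at hb
      | cons x t => simp [pvReversel]
    | (m+2), x :: t, hb =>
      have hm : m < t.length := by simp at hb; omega
      rw [pvReversel_step, pvSwap_zero_succ, pvReversel_cons]
      rw [ih m (by omega) (t.set m x) (by simp at hb ⊢; omega)]
      rw [List.set_eq_take_cons_drop x hm]
      have hlt : (t.take m).length = m := by simp [Nat.le_of_lt hm]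
      rw [List.take_left' hlt, List.drop_left' hlt]
      have htk : (x :: t).take (m+2) = x :: t.take (m+1) := rfl
      have hdr : (x :: t).drop (m+2) = t.drop (m+1) := rfl
      rw [htk, hdr, List.take_add_one]
      have : t[m]? = some (t.getD m 0) := by
        rw [List.getD_eq_getElem t 0 hm]; exact List.getElem?_eq_getElem hm
      rw [this]
      simp

theorem pvReversel_full (l : List Int) : pvReversel l 0 l.length = l.reverse := by
  rw [pvReversel_zero l l.length (le_refl _)]
  simp

theorem pvFindJ_cons (x : Int) (r : List Int) (i j : Nat) :
    pvFindJ (x :: r) (i+1) (j+1) = pvFindJ r i j + 1 := by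
  induction j with
  | zero => simp [pvFindJ]
  | succ m ih =>
    rw [show pvFindJ (x::r) (i+1) (m+2) = if i+1 < m+2 then (if (x::r).getD (i+1) 0 < (x::r).getD (m+2) 0 then m+2 else pvFindJ (x::r) (i+1) (m+1)) else m+2 from rfl]
    rw [show pvFindJ r i (m+1) = if i < m+1 then (if r.getD i 0 < r.getD (m+1) 0 then m+1 else pvFindJ r i m) else m+1 from rfl]
    simp only [List.getD_cons_succ]
    by_cases h : i < m+1
    · simp only [if_pos h, if_pos (by omega : i+1 < m+2)]
      split <;> simp [ih]
    · simp [show ¬ i ≤ m by omega]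

theorem pvNextPerm_cons' {r q : List Int} (x : Int) (h : pvNextPerm r = some q) :
    pvNextPerm (x :: r) = some (x :: q) := by
  have hr : r ≠ [] := by
    rintro rfl
    simp [pvNextPerm, pvFindI] at h
  unfold pvNextPerm at h
  cases hI : pvFindI r (r.length - 1) with
  | none => rw [hI] at h; simp at h
  | some i =>
    rw [hI] at h
    simp only [Option.some.injEq] at h
    have hlen : r.length = (r.length - 1) + 1 := by
      cases r with | nil => exact absurd rfl hr | cons a t => simp
    unfold pvNextPerm
    have h1 : (x :: r).length - 1 = (r.length - 1) + 1 := by simp [List.length_cons]; omega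
    rw [h1, pvFindI_cons, hI]
    simp only []
    have hJ : pvFindJ (x :: r) (i+1) ((r.length - 1) + 1) = pvFindJ r i (r.length - 1) + 1 := by
      exact pvFindJ_cons x r i (r.length - 1)
    rw [hJ, pvSwap_cons]
    have h2 : (x :: r).length = (pvSwap r i (pvFindJ r i (r.length - 1))).length + 1 := by
      simp [pvSwap]
    rw [h2, pvReversel_cons]
    rw [show (pvSwap r i (pvFindJ r i (r.length - 1))).length = r.length from by simp [pvSwap], h]

theorem pvStepB_cons' {r q : List Int} (x : Int) (h : pvStepB r = some q) :
    pvStepB (x :: r) = some (x :: q) := by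
  cases hI : pvFindI r (r.length - 1) with
  | none =>
    exfalso
    have ht : pvTailStart r (r.length - 1) = 0 := by rw [pvTailStart_eq, hI]
    unfold pvStepB at h
    rw [ht] at h
    simp at h
  | some i =>
    have hts : pvTailStart r (r.length - 1) = i + 1 := by rw [pvTailStart_eq, hI]
    have hr : r ≠ [] := by
      rintro rfl
      simp [pvFindI] at hI
    have hlen : (x::r).length - 1 = (r.length - 1) + 1 := by
      cases r with | nil => exact absurd rfl hr | cons a t => simp
    have hk' : pvTailStart (x::r) ((x::r).length - 1) = i + 2 := by
      rw [hlen, pvTailStart_eq, pvFindI_cons, hI]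
    simp only [pvStepB] at h ⊢
    rw [hts, if_neg (Nat.succ_ne_zero i)] at h
    rw [hk', if_neg (Nat.succ_ne_zero (i+1))]
    rw [show i+2-1 = i+1 from rfl, List.getD_cons_succ,
      show i+1-1 = i from rfl] at *
    rw [show (x::r).drop (i+2) = r.drop (i+1) from rfl]
    cases hmin : PySem.List.min? ((r.drop (i+1)).filter (fun v => decide (r.getD i 0 < v))) (fun x => x) with
    | none => rw [hmin] at h; simp at h
    | some succ =>
      rw [hmin] at h
      simp only [] at h ⊢
      cases hrem : PySem.List.remove? (r.drop (i+1)) succ with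
      | none => rw [hrem] at h; simp at h
      | some t2 =>
        rw [hrem] at h
        simp only [Option.some.injEq] at h ⊢
        rw [show ((x :: r).set (i+1) succ) = x :: r.set i succ from List.set_cons_succ ..]
        rw [List.take_succ_cons, List.cons_append, ← h]

-- adjacent non-increase extends to any pair of indices
theorem pvAnti (s : List Int) (hadj : ∀ u, u + 1 < s.length → s.getD (u+1) 0 ≤ s.getD u 0) :
    ∀ a b, a ≤ b → b < s.length → s.getD b 0 ≤ s.getD a 0 := by
  intro a b hab hb
  induction b with
  | zero =>
    obtain rfl : a = 0 := by omega
    exact le_refl _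
  | succ b ih =>
    rcases Nat.eq_or_lt_of_le hab with rfl | hlt
    · exact le_refl _
    · exact le_trans (hadj b hb) (ih (by omega) (by omega))

-- planting the pivot value at position p keeps the suffix non-increasing
theorem pvSetAnti (s : List Int) (p : Nat) (x : Int) (hp : p < s.length)
    (hanti : ∀ a b, a ≤ b → b < s.length → s.getD b 0 ≤ s.getD a 0)
    (hgt : ∀ t, p < t → t < s.length → s.getD t 0 ≤ x) (hx : x < s.getD p 0) :
    List.Pairwise (fun a b => b ≤ a) (s.set p x) := by
  rw [List.pairwise_iff_getElem]
  intro a b ha hb hab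
  simp only [List.length_set] at ha hb
  rw [List.getElem_set, List.getElem_set]
  by_cases hpa : p = a
  · subst hpa
    rw [if_pos rfl, if_neg (by omega)]
    have hb' := hgt b (by omega) hb
    rwa [List.getD_eq_getElem s 0 hb] at hb'
  · rw [if_neg hpa]
    by_cases hpb : p = b
    · subst hpb
      rw [if_pos rfl]
      have h1 : s.getD p 0 ≤ s.getD a 0 := hanti a p (by omega) hp
      rw [List.getD_eq_getElem s 0 hp] at hx
      rw [List.getD_eq_getElem s 0 hp, List.getD_eq_getElem s 0 ha] at h1
      exact le_trans (le_of_lt hx) h1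
    · rw [if_neg hpb]
      have h1 := hanti a b (le_of_lt hab) hb
      rwa [List.getD_eq_getElem s 0 hb, List.getD_eq_getElem s 0 ha] at h1

-- pivot at index 0: both steps computed and compared directly
theorem pvStep_base (x : Int) (s : List Int)
    (h : pvFindI (x :: s) ((x :: s).length - 1) = some 0) :
    pvStepB (x :: s) = pvNextPerm (x :: s) := by
  have hlen : (x :: s).length - 1 = s.length := by simp
  obtain ⟨hm, hx0, habove⟩ := pvFindI_spec _ _ _ h
  rw [hlen] at hm habove
  have hx0' : x < s.getD 0 0 := by simpa using hx0
  have hadj : ∀ u, u + 1 < s.length → s.getD (u+1) 0 ≤ s.getD u 0 := by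
    intro u hu
    have h' := habove (u+1) (by omega) (by omega)
    simpa using h'
  have hanti := pvAnti s hadj
  obtain ⟨hj1, hjm, hjlt, hjab⟩ := pvFindJ_props (x :: s) s.length hm (by simpa using hx0)
  obtain ⟨p, hpj⟩ : ∃ p, pvFindJ (x :: s) 0 s.length = p + 1 :=
    ⟨pvFindJ (x :: s) 0 s.length - 1, by omega⟩
  rw [hpj] at hjm hjlt hjab
  have hp : p < s.length := by omega
  have hgp : x < s.getD p 0 := by
    rw [List.getD_cons_succ] at hjlt
    simpa using hjlt
  have hgt : ∀ t, p < t → t < s.length → s.getD t 0 ≤ x := by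
    intro t ht1 ht2
    have h' := hjab (t+1) (by omega) (by omega)
    rwa [List.getD_cons_succ, List.getD_cons_zero] at h'
  have hgpmem : s.getD p 0 ∈ s.filter (fun v => decide (x < v)) :=
    List.mem_filter.2 ⟨by rw [List.getD_eq_getElem s 0 hp]; exact List.getElem_mem hp, by simpa using hgp⟩
  cases hmin : PySem.List.min? (s.filter (fun v => decide (x < v))) (fun x => x) with
  | none =>
    exfalso
    rw [PySem.List.min?_eq_none_iff] at hmin
    rw [hmin] at hgpmem
    simp at hgpmem
  | some succ =>
    have hsmem := PySem.List.min?_mem hmin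
    obtain ⟨hsS, hsx⟩ := List.mem_filter.1 hsmem
    have hsx' : x < succ := by simpa using hsx
    have h1 : succ ≤ s.getD p 0 := PySem.List.min?_isMin hmin _ hgpmem
    have h2 : s.getD p 0 ≤ succ := by
      obtain ⟨t, ht, hts⟩ := List.mem_iff_getElem.1 hsS
      by_cases htp : t ≤ p
      · calc s.getD p 0 ≤ s.getD t 0 := hanti t p htp hp
          _ = succ := by rw [List.getD_eq_getElem s 0 ht, hts]
      · exfalso
        have h' := hgt t (by omega) ht
        rw [List.getD_eq_getElem s 0 ht, hts] at h'
        omega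
    have hsucc : succ = s.getD p 0 := le_antisymm h1 h2
    have hk : pvTailStart (x :: s) ((x :: s).length - 1) = 1 := by
      rw [pvTailStart_eq, h]
    have hB : pvStepB (x :: s) = some (succ :: PySem.List.sorted (s.erase succ ++ [x]) (fun x => x) false) := by
      simp only [pvStepB]
      rw [hk, if_neg one_ne_zero]
      rw [show (1:Nat)-1 = 0 from rfl, List.getD_cons_zero, show (x::s).drop 1 = s from rfl]
      rw [hmin]
      simp only []
      rw [PySem.List.remove?_eq_some_erase s succ hsS]
      simp only [Option.some.injEq]
      rw [List.set_cons_zero]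
      rfl
    have hswap : pvSwap (x :: s) 0 (p+1) = s.getD p 0 :: s.set p x := pvSwap_zero_succ x s p
    have hA : pvNextPerm (x :: s) = some (s.getD p 0 :: (s.set p x).reverse) := by
      unfold pvNextPerm
      rw [h]
      simp only []
      rw [hlen, hpj, hswap]
      rw [show (x :: s).length = (s.set p x).length + 1 from by simp]
      rw [show (0:Nat) + 1 = 0 + 1 from rfl, pvReversel_cons, pvReversel_full]
    have hsorted : PySem.List.sorted (s.erase (s.getD p 0) ++ [x]) (fun x => x) false = (s.set p x).reverse := by
      apply PySem.List.sorted_id_eq_of_perm_of_pairwise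
      · have e1 : s.set p x = s.take p ++ x :: s.drop (p+1) := List.set_eq_take_cons_drop x hp
        have e2 : s = s.take p ++ s[p] :: s.drop (p+1) := by
          conv_lhs => rw [← List.set_getElem_self hp, List.set_eq_take_cons_drop _ hp]
        have hgpe : s[p] = s.getD p 0 := (List.getD_eq_getElem s 0 hp).symm
        have P2 : s.Perm (s.getD p 0 :: (s.take p ++ s.drop (p+1))) := by
          rw [← hgpe]
          conv_lhs => rw [e2]
          exact List.perm_middle
        have P3 : s.Perm (s.getD p 0 :: s.erase (s.getD p 0)) := by
          apply List.perm_cons_erase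
          rw [List.getD_eq_getElem s 0 hp]
          exact List.getElem_mem hp
        have P4 : (s.take p ++ s.drop (p+1)).Perm (s.erase (s.getD p 0)) :=
          List.Perm.cons_inv (P2.symm.trans P3)
        have C1 : (s.set p x).Perm (x :: (s.take p ++ s.drop (p+1))) := by
          rw [e1]; exact List.perm_middle
        exact ((List.reverse_perm _).trans ((C1.trans (P4.cons x)).trans
          (List.perm_append_singleton x _).symm))
      · rw [List.pairwise_reverse]
        exact pvSetAnti s p x hp hanti hgt hgp
    rw [hA, hB, hsucc, hsorted]

theorem pvStep_eq (cur : List Int) : pvStepB cur = pvNextPerm cur := by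
  induction cur with
  | nil => rfl
  | cons y r ih =>
    cases h : pvFindI (y :: r) ((y :: r).length - 1) with
    | none =>
      have hk : pvTailStart (y::r) ((y::r).length - 1) = 0 := by rw [pvTailStart_eq, h]
      unfold pvStepB pvNextPerm
      rw [hk, h]
      simp
    | some i =>
      cases i with
      | zero => exact pvStep_base y r h
      | succ i =>
        have hr : r ≠ [] := by
          rintro rfl
          simp [pvFindI] at h
        have hlen : (y::r).length - 1 = (r.length - 1) + 1 := by
          cases r with | nil => exact absurd rfl hr | cons a t => simp
        rw [hlen, pvFindI_cons] at h
        cases hI : pvFindI r (r.length - 1) with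
        | none =>
          rw [hI] at h
          simp only [] at h
          split at h <;> simp at h
        | some i' =>
          rw [hI] at h
          simp only [Option.some.injEq] at h
          obtain rfl : i' = i := by omega
          have hq : ∃ q, pvNextPerm r = some q := by
            unfold pvNextPerm
            rw [hI]
            exact ⟨_, rfl⟩
          obtain ⟨q, hq⟩ := hq
          have hB : pvStepB r = some q := by rw [ih, hq]
          rw [pvStepB_cons' y hB, pvNextPerm_cons' y hq]

theorem pvEmit_eq (Y : List (List Int)) : pvEmitA Y = pvEmitB Y := by
  cases Y with
  | nil => rfl
  | cons y t =>
    obtain ⟨w, hw⟩ : ∃ w, (y :: t).getLast? = some w := by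
      cases h : (y :: t).getLast? with
      | none => exact absurd (List.getLast?_eq_none_iff.1 h) (by simp)
      | some w => exact ⟨w, rfl⟩
    rw [pvEmitA, pvEmitB, hw, List.getLastD_eq_getLast?, hw]
    rfl

theorem pvLoop_eq (f : Nat) (cur : List Int) : pvLoopB f cur = pvLoop f cur := by
  induction f generalizing cur with
  | zero => rfl
  | succ f ih =>
    rw [show pvLoopB (f+1) cur = (match pvStepB cur with | none => [] | some nxt => nxt :: pvLoopB f nxt) from rfl]
    rw [show pvLoop (f+1) cur = (match pvNextPerm cur with | none => [] | some nxt => nxt :: pvLoop f nxt) from rfl]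
    rw [pvStep_eq]
    cases pvNextPerm cur with
    | none => rfl
    | some nxt => simp only []; rw [ih]

-- ===== VERDICT (by name: the statement is the Claim_ definition above) =====
theorem permutations_lexico_spec : Claim_equal_permutations_lexico := by
  intro l _
  unfold Spec_permutations_lexico permutations_lexico permutations_lexico_alt
  by_cases hl : l = []
  · simp [hl]
  · rw [if_neg hl, if_neg hl, pvLoop_eq, pvEmit_eq]
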